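-- pv_equiv track=rewrite | github.com/pkusp/ai-center | temp_experiments/netease.py | max_min_living
-- ===== SOURCE A (Python) =====
-- def max_min_living(n,k):
--     mini = 0
--     maxi = k-1
--     if 2*k -1 <= n :
--         return mini,maxi
--     else:
--         while(2*k-1>n):
--             k-=1
--             n-=1
--         return mini, k-1
-- ===== SOURCE B (Python) =====
-- def max_min_living(n, k):
--     # Closed form: the loop in A decrements k and n together until 2k-1 <= n,
--     # which lands k-1 at n-k; so answer is (0, k-1) if 2k-1 <= n else (0, n-k).
--     return (0, k - 1) if 2 * k - 1 <= n else (0, n - k)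
-- ===== Notes on version B (the rewrite author's own statement) =====
-- stated objective: faster
-- what changed: Replaced the decrement-both loop with the closed form (0, n-k) for the 2k-1>n case, since each iteration reduces 2k-1-n by exactly 1.
import Mathlib
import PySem

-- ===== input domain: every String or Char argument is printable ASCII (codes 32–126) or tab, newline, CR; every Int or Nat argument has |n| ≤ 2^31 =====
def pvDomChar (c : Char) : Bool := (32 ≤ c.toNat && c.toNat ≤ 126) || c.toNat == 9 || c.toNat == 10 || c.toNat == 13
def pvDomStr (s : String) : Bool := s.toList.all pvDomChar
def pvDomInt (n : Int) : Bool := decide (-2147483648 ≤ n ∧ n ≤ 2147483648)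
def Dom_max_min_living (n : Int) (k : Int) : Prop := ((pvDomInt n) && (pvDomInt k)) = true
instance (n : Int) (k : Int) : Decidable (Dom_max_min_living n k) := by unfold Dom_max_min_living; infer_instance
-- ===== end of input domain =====

-- B replaces A's decrement-both loop with the O(1) closed form (0, n-k) when 2k-1>n (objective: faster).


-- ===== PORT A =====
-- the 'while 2*k-1 > n: k -= 1; n -= 1' loop; returns final (0, k-1)
def maxMinLoop (n : Int) (k : Int) : Int × Int :=
  if 2*k - 1 > n then maxMinLoop (n-1) (k-1) else (0, k-1)
termination_by (2*k - 1 - n).toNat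
decreasing_by omega

def max_min_living (n : Int) (k : Int) : Int × Int :=
  let mini : Int := 0
  let maxi : Int := k - 1
  if 2*k - 1 ≤ n then (mini, maxi)
  else maxMinLoop n k

-- ===== PORT B =====
def max_min_living_alt (n : Int) (k : Int) : Int × Int :=
  if 2*k - 1 ≤ n then (0, k - 1) else (0, n - k)

-- ===== PRECONDITION & SPEC =====
def Spec_max_min_living (n : Int) (k : Int) (out : Int × Int) : Prop := out = max_min_living_alt n k
instance (n : Int) (k : Int) (out : Int × Int) : Decidable (Spec_max_min_living n k out) := by unfold Spec_max_min_living; infer_instance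

-- ===== CLAIM (what is proved, stated in full; the proofs are below) =====
def Claim_equal_max_min_living : Prop := ∀ (n : Int) (k : Int), Dom_max_min_living n k → Spec_max_min_living n k (max_min_living n k)

-- ===== LEMMAS AND PROOFS =====
theorem maxMinLoop_eq (n k : Int) (h : 2*k - 1 > n) : maxMinLoop n k = (0, n - k) := by
  rw [maxMinLoop]
  rw [if_pos h]
  by_cases h2 : 2*(k-1) - 1 > n - 1
  · have := maxMinLoop_eq (n-1) (k-1) h2
    rw [this]
    congr 1
    omega
  · rw [maxMinLoop, if_neg h2]
    congr 1
    omega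
termination_by (2*k - 1 - n).toNat
decreasing_by omega

-- ===== VERDICT (by name: the statement is the Claim_ definition above) =====
theorem max_min_living_spec : Claim_equal_max_min_living := by
  intro n k _
  unfold Spec_max_min_living max_min_living max_min_living_alt
  by_cases h : 2*k - 1 ≤ n
  · simp [h]
  · simp only [h, if_neg h]
    exact maxMinLoop_eq n k (by omega)
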